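-- pv_equiv track=rewrite | github.com/fa18kouki/WirelessAgent_R1 | WA_DS_V3_KB.py | apply_heuristic_latency
-- ===== SOURCE A (Python) =====
-- def apply_heuristic_latency(slice_type, request, min_latency, max_latency):
--     """Apply heuristic rules to determine latency based on request type"""
--     request_lower = request.lower()
--
--     if slice_type == "eMBB":
--         if any(keyword in request_lower for keyword in ["video", "stream", "watch", "movie", "4k", "8k"]):
--             return min(max_latency, 50)  # Medium latency for video is fine
--         elif any(keyword in request_lower for keyword in ["download", "file", "upload"]):
--             return min(max_latency, 80)  # Higher latency for downloads is acceptable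
--         elif any(keyword in request_lower for keyword in ["conference", "meeting", "call"]):
--             return min(max_latency, 30)  # Lower latency for interactive conferencing
--         else:
--             return min(max_latency, 40)  # Lower latency for interactive eMBB
--     else:  # URLLC
--         if any(keyword in request_lower for keyword in ["surgery", "medical", "emergency"]):
--             return max(min_latency, 1)  # Lowest possible latency for critical applications
--         elif any(keyword in request_lower for keyword in ["control", "automation", "robot"]):
--             return max(min_latency, 3)  # Very low latency for control
--         else:
--             return max(min_latency, 5)  # Low latency for other URLLC applications
-- ===== SOURCE B (Python) =====
-- # Flat keyword table: (keyword, priority, value). One exhaustive pass keeps the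
-- # best-priority (lowest) hit; no grouped cascade, no early return.
-- EMBB_TABLE = [
--     ("video", 0, 50), ("stream", 0, 50), ("watch", 0, 50),
--     ("movie", 0, 50), ("4k", 0, 50), ("8k", 0, 50),
--     ("download", 1, 80), ("file", 1, 80), ("upload", 1, 80),
--     ("conference", 2, 30), ("meeting", 2, 30), ("call", 2, 30),
-- ]
-- URLLC_TABLE = [
--     ("surgery", 0, 1), ("medical", 0, 1), ("emergency", 0, 1),
--     ("control", 1, 3), ("automation", 1, 3), ("robot", 1, 3),
-- ]
--
--
-- def apply_heuristic_latency(slice_type, request, min_latency, max_latency):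
--     """Arg-min over a flat keyword table, then the slice's clamp."""
--     rl = request.lower()
--     if slice_type == "eMBB":
--         table, default = EMBB_TABLE, 40
--     else:
--         table, default = URLLC_TABLE, 5
--     best = None
--     for kw, p, v in table:
--         if kw in rl and (best is None or p < best[0]):
--             best = (p, v)
--     v = default if best is None else best[1]
--     return min(max_latency, v) if slice_type == "eMBB" else max(min_latency, v)
-- ===== Notes on version B (the rewrite author's own statement) =====
-- stated objective: alternative
-- what changed: Replaces the grouped if/elif keyword cascade with an exhaustive single pass over a flat (keyword, priority, value) table that keeps the lowest-priority hit in an accumulator, then applies the slice's clamp.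
import Mathlib
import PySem

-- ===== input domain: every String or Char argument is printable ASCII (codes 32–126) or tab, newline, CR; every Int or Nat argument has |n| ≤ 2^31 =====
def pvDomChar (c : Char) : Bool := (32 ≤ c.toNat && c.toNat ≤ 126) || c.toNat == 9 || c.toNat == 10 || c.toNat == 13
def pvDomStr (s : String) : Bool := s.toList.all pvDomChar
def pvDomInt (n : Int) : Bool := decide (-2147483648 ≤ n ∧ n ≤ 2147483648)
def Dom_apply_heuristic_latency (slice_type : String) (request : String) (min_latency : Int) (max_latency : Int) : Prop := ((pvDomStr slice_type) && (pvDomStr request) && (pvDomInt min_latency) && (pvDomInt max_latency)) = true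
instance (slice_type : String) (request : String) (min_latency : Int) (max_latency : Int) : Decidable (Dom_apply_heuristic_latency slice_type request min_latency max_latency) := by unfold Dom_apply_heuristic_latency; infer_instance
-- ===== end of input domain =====

-- ===== PORT A =====
-- B change: grouped if/elif keyword cascade replaced by one exhaustive pass over a flat (keyword, priority, value) table keeping the lowest-priority hit (alternative decomposition; same cost).
def apply_heuristic_latency (slice_type : String) (request : String) (min_latency : Int) (max_latency : Int) : Int :=
  let request_lower := PySem.Str.lower request
  if slice_type == "eMBB" then
    if ["video", "stream", "watch", "movie", "4k", "8k"].any (fun keyword => PySem.Str.isIn keyword request_lower) then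
      min max_latency 50
    else if ["download", "file", "upload"].any (fun keyword => PySem.Str.isIn keyword request_lower) then
      min max_latency 80
    else if ["conference", "meeting", "call"].any (fun keyword => PySem.Str.isIn keyword request_lower) then
      min max_latency 30
    else
      min max_latency 40
  else
    if ["surgery", "medical", "emergency"].any (fun keyword => PySem.Str.isIn keyword request_lower) then
      max min_latency 1
    else if ["control", "automation", "robot"].any (fun keyword => PySem.Str.isIn keyword request_lower) then
      max min_latency 3
    else
      max min_latency 5

-- ===== PORT B =====
def pvTableEMBB : List (String × Int × Int) :=
  [("video", 0, 50), ("stream", 0, 50), ("watch", 0, 50),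
   ("movie", 0, 50), ("4k", 0, 50), ("8k", 0, 50),
   ("download", 1, 80), ("file", 1, 80), ("upload", 1, 80),
   ("conference", 2, 30), ("meeting", 2, 30), ("call", 2, 30)]

def pvTableURLLC : List (String × Int × Int) :=
  [("surgery", 0, 1), ("medical", 0, 1), ("emergency", 0, 1),
   ("control", 1, 3), ("automation", 1, 3), ("robot", 1, 3)]

-- the for-loop of Source B: fold over the flat table, keeping the lowest-priority hit
def pvBestHit (rl : String) (table : List (String × Int × Int)) : Option (Int × Int) :=
  table.foldl (fun best kv =>
    if PySem.Str.isIn kv.1 rl && (match best with | none => true | some b => decide (kv.2.1 < b.1)) then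
      some (kv.2.1, kv.2.2)
    else best) none

def apply_heuristic_latency_alt (slice_type : String) (request : String) (min_latency : Int) (max_latency : Int) : Int :=
  let rl := PySem.Str.lower request
  let td := if slice_type == "eMBB" then (pvTableEMBB, (40 : Int)) else (pvTableURLLC, (5 : Int))
  let best := pvBestHit rl td.1
  let v := match best with | none => td.2 | some b => b.2
  if slice_type == "eMBB" then min max_latency v else max min_latency v

-- ===== PRECONDITION & SPEC =====
def Spec_apply_heuristic_latency (slice_type : String) (request : String) (min_latency : Int) (max_latency : Int) (out : Int) : Prop := out = apply_heuristic_latency_alt slice_type request min_latency max_latency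
instance (slice_type : String) (request : String) (min_latency : Int) (max_latency : Int) (out : Int) : Decidable (Spec_apply_heuristic_latency slice_type request min_latency max_latency out) := by unfold Spec_apply_heuristic_latency; infer_instance

-- ===== CLAIM (what is proved, stated in full; the proofs are below) =====
def Claim_equal_apply_heuristic_latency : Prop := ∀ (slice_type : String) (request : String) (min_latency : Int) (max_latency : Int), Dom_apply_heuristic_latency slice_type request min_latency max_latency → Spec_apply_heuristic_latency slice_type request min_latency max_latency (apply_heuristic_latency slice_type request min_latency max_latency)

-- ===== LEMMAS AND PROOFS =====

-- the loop body of Source B's for-loop, named for the proofs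
def pvStep (best : Option (Int × Int)) (kv : Bool × Int × Int) : Option (Int × Int) :=
  if kv.1 && (match best with | none => true | some b => decide (kv.2.1 < b.1)) then
    some (kv.2.1, kv.2.2)
  else best

-- pvBestHit with the membership tests replaced by precomputed booleans
def pvBestHitB (table : List (Bool × Int × Int)) : Option (Int × Int) :=
  table.foldl pvStep none

theorem pvBestHit_eq_B (rl : String) (t : List (String × Int × Int)) :
    pvBestHit rl t = pvBestHitB (t.map (fun kv => (PySem.Str.isIn kv.1 rl, kv.2))) := by
  unfold pvBestHit pvBestHitB
  rw [List.foldl_map]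
  rfl

-- a group of entries with priority p never replaces a hit of priority q ≤ p
theorem pvFoldl_stuck (p v q w : Int) (h : ¬ p < q) (bs : List Bool) :
    List.foldl pvStep (some (q, w)) (bs.map (fun b => (b, p, v))) = some (q, w) := by
  induction bs with
  | nil => rfl
  | cons b rest ih => simp [pvStep, h, ih]

-- from no hit, a constant-priority group yields its entry iff some flag is set
theorem pvFoldl_grp (p v : Int) (bs : List Bool) :
    List.foldl pvStep none (bs.map (fun b => (b, p, v)))
      = if bs.any id then some (p, v) else none := by
  induction bs with
  | nil => rfl
  | cons b rest ih =>
    cases b with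
    | false => simpa [List.foldl, pvStep] using ih
    | true => simp [pvStep, pvFoldl_stuck p v p v (lt_irrefl p)]

theorem pvSelE (as bs cs : List Bool) :
    pvBestHitB ((as.map fun a => (a, (0 : Int), (50 : Int)))
        ++ (bs.map fun b => (b, (1 : Int), (80 : Int)))
        ++ (cs.map fun c => (c, (2 : Int), (30 : Int))))
      = (if as.any id then some ((0 : Int), (50 : Int))
         else if bs.any id then some ((1 : Int), (80 : Int))
         else if cs.any id then some ((2 : Int), (30 : Int)) else none) := by
  unfold pvBestHitB
  rw [List.foldl_append, List.foldl_append, pvFoldl_grp]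
  by_cases ha : as.any id
  · simp [ha, pvFoldl_stuck 1 80 0 50 (by norm_num), pvFoldl_stuck 2 30 0 50 (by norm_num)]
  · simp only [ha, Bool.false_eq_true, if_false]
    rw [pvFoldl_grp]
    by_cases hb : bs.any id
    · simp [hb, pvFoldl_stuck 2 30 1 80 (by norm_num)]
    · simp only [hb, Bool.false_eq_true, if_false]
      rw [pvFoldl_grp]

theorem pvSelU (as bs : List Bool) :
    pvBestHitB ((as.map fun a => (a, (0 : Int), (1 : Int)))
        ++ (bs.map fun b => (b, (1 : Int), (3 : Int))))
      = (if as.any id then some ((0 : Int), (1 : Int))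
         else if bs.any id then some ((1 : Int), (3 : Int)) else none) := by
  unfold pvBestHitB
  rw [List.foldl_append, pvFoldl_grp]
  by_cases ha : as.any id
  · simp [ha, pvFoldl_stuck 1 3 0 1 (by norm_num)]
  · simp only [ha, Bool.false_eq_true, if_false]
    rw [pvFoldl_grp]

-- ===== VERDICT (by name: the statement is the Claim_ definition above) =====
theorem apply_heuristic_latency_spec : Claim_equal_apply_heuristic_latency := by
  intro slice_type request min_latency max_latency _
  unfold Spec_apply_heuristic_latency apply_heuristic_latency apply_heuristic_latency_alt
  by_cases h : slice_type == "eMBB"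
  · simp only [h, if_true]
    rw [pvBestHit_eq_B,
      show pvTableEMBB.map (fun kv => (PySem.Str.isIn kv.1 (PySem.Str.lower request), kv.2))
          = (([PySem.Str.isIn "video" (PySem.Str.lower request), PySem.Str.isIn "stream" (PySem.Str.lower request),
               PySem.Str.isIn "watch" (PySem.Str.lower request), PySem.Str.isIn "movie" (PySem.Str.lower request),
               PySem.Str.isIn "4k" (PySem.Str.lower request), PySem.Str.isIn "8k" (PySem.Str.lower request)].map
                 fun a => (a, (0 : Int), (50 : Int)))
             ++ ([PySem.Str.isIn "download" (PySem.Str.lower request), PySem.Str.isIn "file" (PySem.Str.lower request),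
                  PySem.Str.isIn "upload" (PySem.Str.lower request)].map fun b => (b, (1 : Int), (80 : Int)))
             ++ ([PySem.Str.isIn "conference" (PySem.Str.lower request), PySem.Str.isIn "meeting" (PySem.Str.lower request),
                  PySem.Str.isIn "call" (PySem.Str.lower request)].map fun c => (c, (2 : Int), (30 : Int)))) from rfl,
      pvSelE]
    simp only [List.any_cons, List.any_nil, Bool.or_false, id]
    split_ifs <;> rfl
  · simp only [h, if_false, Bool.false_eq_true]
    rw [pvBestHit_eq_B,
      show pvTableURLLC.map (fun kv => (PySem.Str.isIn kv.1 (PySem.Str.lower request), kv.2))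
          = (([PySem.Str.isIn "surgery" (PySem.Str.lower request), PySem.Str.isIn "medical" (PySem.Str.lower request),
               PySem.Str.isIn "emergency" (PySem.Str.lower request)].map fun a => (a, (0 : Int), (1 : Int)))
             ++ ([PySem.Str.isIn "control" (PySem.Str.lower request), PySem.Str.isIn "automation" (PySem.Str.lower request),
                  PySem.Str.isIn "robot" (PySem.Str.lower request)].map fun b => (b, (1 : Int), (3 : Int)))) from rfl,
      pvSelU]
    simp only [List.any_cons, List.any_nil, Bool.or_false, id]
    split_ifs <;> rfl
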